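-- pv_equiv track=rewrite | github.com/MdAbedin/binarysearch | 0452 Bomber Man Sequel.py | solve
-- ===== SOURCE A (Python) =====
-- def solve(matrix):
--     R,C = len(matrix),len(matrix[0])
--
--     runs = [[[1,1,1,1] if matrix[r][c] == 2 else [0,0,0,0] for c in range(C)] for r in range(R)]
--
--     for r in range(R):
--         for c in range(C):
--             if matrix[r][c] in [0,2]:
--                 if r-1 >= 0: runs[r][c][0] += runs[r-1][c][0]
--                 if c-1 >= 0: runs[r][c][1] += runs[r][c-1][1]
--
--     for r in reversed(range(R)):
--         for c in reversed(range(C)):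
--             if matrix[r][c] in [0,2]:
--                 if r+1 < R: runs[r][c][2] += runs[r+1][c][2]
--                 if c+1 < C: runs[r][c][3] += runs[r][c+1][3]
--
--     return max((sum(runs[r][c]) for r in range(R) for c in range(C) if matrix[r][c] == 0),default = 0)
-- ===== SOURCE B (Python) =====
-- def solve(matrix):
--     R, C = len(matrix), len(matrix[0])
--
--     def count(r, c, dr, dc):
--         total = 0
--         r += dr; c += dc
--         while 0 <= r < R and 0 <= c < C and matrix[r][c] in (0, 2):
--             if matrix[r][c] == 2:
--                 total += 1
--             r += dr; c += dc
--         return total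
--
--     best = 0
--     for r in range(R):
--         for c in range(C):
--             if matrix[r][c] == 0:
--                 best = max(best, count(r, c, -1, 0) + count(r, c, 1, 0)
--                            + count(r, c, 0, -1) + count(r, c, 0, 1))
--     return best
-- ===== Notes on version B (the rewrite author's own statement) =====
-- stated objective: simpler
-- what changed: Replaces the mutable 4-component runs table with its forward and backward DP sweeps by a direct outward walk from each empty cell, counting 2s in each of the four directions until the grid edge or a blocked cell; no table is allocated and walks stop at the first blocker, which also makes it measurably faster on random inputs.
import Mathlib
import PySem

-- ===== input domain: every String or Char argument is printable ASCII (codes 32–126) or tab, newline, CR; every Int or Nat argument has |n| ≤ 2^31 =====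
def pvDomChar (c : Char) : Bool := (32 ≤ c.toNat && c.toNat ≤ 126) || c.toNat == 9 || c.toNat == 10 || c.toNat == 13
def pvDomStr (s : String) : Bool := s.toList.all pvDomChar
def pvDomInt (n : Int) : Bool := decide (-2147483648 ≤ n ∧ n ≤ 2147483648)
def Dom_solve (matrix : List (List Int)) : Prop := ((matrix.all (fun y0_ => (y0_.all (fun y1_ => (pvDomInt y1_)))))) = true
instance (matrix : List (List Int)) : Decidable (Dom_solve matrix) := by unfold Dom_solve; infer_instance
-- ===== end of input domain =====

-- B replaces A's mutable 4-component runs table and its two DP sweeps by a direct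
-- outward walk from each empty cell; simpler, and measurably faster on random inputs
-- (no table allocation/updates, walks stop at the first blocked cell).

-- ===== PORT A =====
-- A mutates a local `runs` table (a list of lists of 4-lists); ported as a
-- List (List (Int×Int×Int×Int)) threaded through folds.  Python's
-- `for r in range(R)` with R = len(matrix) is ported as a fold over
-- List.range matrix.length (the same indices 0..R-1).
abbrev PVCell := Int × Int × Int × Int

def pvMat (matrix : List (List Int)) (r c : Nat) : Int := (matrix.getD r []).getD c 0
def pvOk (v : Int) : Bool := v == 0 || v == 2          -- matrix[r][c] in [0,2]
def pvGetCell (t : List (List PVCell)) (r c : Nat) : PVCell := (t.getD r []).getD c (0,0,0,0)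
def pvSetCell (t : List (List PVCell)) (r c : Nat) (v : PVCell) : List (List PVCell) :=
  t.set r ((t.getD r []).set c v)

def pvInit (matrix : List (List Int)) (R C : Nat) : List (List PVCell) :=
  (List.range R).map (fun r => (List.range C).map (fun c =>
    if pvMat matrix r c == 2 then ((1:Int),(1:Int),(1:Int),(1:Int)) else (0,0,0,0)))

-- `runs[r][c][k] += x` is an in-place modification of one cell
def pvModCell (t : List (List PVCell)) (r c : Nat) (f : PVCell → PVCell) :
    List (List PVCell) :=
  pvSetCell t r c (f (pvGetCell t r c))

def pvStep1 (matrix : List (List Int)) (t : List (List PVCell)) (r c : Nat) :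
    List (List PVCell) :=
  if pvOk (pvMat matrix r c) then
    let t1 := if 1 ≤ r then
        pvModCell t r c (fun v => (v.1 + (pvGetCell t (r-1) c).1, v.2.1, v.2.2.1, v.2.2.2))
      else t
    if 1 ≤ c then
      pvModCell t1 r c (fun v => (v.1, v.2.1 + (pvGetCell t1 r (c-1)).2.1, v.2.2.1, v.2.2.2))
    else t1
  else t

def pvStep2 (matrix : List (List Int)) (R C : Nat) (t : List (List PVCell)) (r c : Nat) :
    List (List PVCell) :=
  if pvOk (pvMat matrix r c) then
    let t1 := if r+1 < R then
        pvModCell t r c (fun v => (v.1, v.2.1, v.2.2.1 + (pvGetCell t (r+1) c).2.2.1, v.2.2.2))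
      else t
    if c+1 < C then
      pvModCell t1 r c (fun v => (v.1, v.2.1, v.2.2.1, v.2.2.2 + (pvGetCell t1 r (c+1)).2.2.2))
    else t1
  else t

def pvPass1 (matrix : List (List Int)) (R C : Nat) (t : List (List PVCell)) :
    List (List PVCell) :=
  (List.range R).foldl (fun t r => (List.range C).foldl (fun t c => pvStep1 matrix t r c) t) t

def pvPass2 (matrix : List (List Int)) (R C : Nat) (t : List (List PVCell)) :
    List (List PVCell) :=
  (List.range R).reverse.foldl
    (fun t r => (List.range C).reverse.foldl (fun t c => pvStep2 matrix R C t r c) t) t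

def pvSum4 (v : PVCell) : Int := v.1 + v.2.1 + v.2.2.1 + v.2.2.2

def solve (matrix : List (List Int)) : Int :=
  let R := matrix.length
  let C := (matrix.getD 0 []).length
  let runs := pvPass2 matrix R C (pvPass1 matrix R C (pvInit matrix R C))
  let sums := (List.range R).flatMap (fun r => (List.range C).filterMap (fun c =>
    if pvMat matrix r c == 0 then some (pvSum4 (pvGetCell runs r c)) else none))
  (PySem.List.max? sums (fun x => x)).getD 0

-- ===== PORT B =====
-- the while loop of Source B's `count`, as fuel recursion (fuel R+C bounds any straight walk)
def pvWalk (matrix : List (List Int)) (R C : Nat) (dr dc : Int) :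
    Nat → Int → Int → Int
  | 0, _, _ => 0
  | fuel+1, r, c =>
    if 0 ≤ r ∧ r < (R:Int) ∧ 0 ≤ c ∧ c < (C:Int) ∧ pvOk (pvMat matrix r.toNat c.toNat) = true then
      (if pvMat matrix r.toNat c.toNat == 2 then 1 else 0) + pvWalk matrix R C dr dc fuel (r+dr) (c+dc)
    else 0

def pvCount (matrix : List (List Int)) (R C : Nat) (r c : Nat) (dr dc : Int) : Int :=
  pvWalk matrix R C dr dc (R+C) ((r:Int)+dr) ((c:Int)+dc)

def solve_alt (matrix : List (List Int)) : Int :=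
  let R := matrix.length
  let C := (matrix.getD 0 []).length
  (List.range R).foldl (fun best r => (List.range C).foldl (fun best c =>
    if pvMat matrix r c == 0 then
      max best (pvCount matrix R C r c (-1) 0 + pvCount matrix R C r c 1 0
        + pvCount matrix R C r c 0 (-1) + pvCount matrix R C r c 0 1)
    else best) best) 0

-- ===== PRECONDITION & SPEC =====
-- Pre_ excludes exactly the inputs where Python A raises IndexError: the empty
-- matrix (len(matrix[0])) and matrices with a row shorter than row 0.
def Pre_solve (matrix : List (List Int)) : Prop :=
  matrix ≠ [] ∧ ∀ row ∈ matrix, (matrix.getD 0 []).length ≤ row.length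
instance (matrix : List (List Int)) : Decidable (Pre_solve matrix) := by
  unfold Pre_solve; infer_instance

def pvWitness_solve : List (List Int) := [[0, 2], [2, 1]]

def Spec_solve (matrix : List (List Int)) (out : Int) : Prop := out = solve_alt matrix
instance (matrix : List (List Int)) (out : Int) : Decidable (Spec_solve matrix out) := by
  unfold Spec_solve; infer_instance

-- ===== CLAIM (what is proved, stated in full; the proofs are below) =====
def Claim_equal_solve : Prop :=
  ∀ (matrix : List (List Int)), Dom_solve matrix → Pre_solve matrix →
    Spec_solve matrix (solve matrix)


-- ===== LEMMAS AND PROOFS =====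

-- specification values: number of 2s reachable through {0,2}-cells from (r,c)
-- (inclusive) going up / left / down / right
def pvI2 (m : List (List Int)) (r c : Nat) : Int := if pvMat m r c == 2 then 1 else 0

def pvU (m : List (List Int)) : Nat → Nat → Int
  | 0, c => if pvOk (pvMat m 0 c) then pvI2 m 0 c else 0
  | r+1, c => if pvOk (pvMat m (r+1) c) then pvI2 m (r+1) c + pvU m r c else 0

def pvL (m : List (List Int)) (r : Nat) : Nat → Int
  | 0 => if pvOk (pvMat m r 0) then pvI2 m r 0 else 0
  | c+1 => if pvOk (pvMat m r (c+1)) then pvI2 m r (c+1) + pvL m r c else 0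

def pvD (m : List (List Int)) (R : Nat) (r c : Nat) : Int :=
  if _h : r < R then
    (if pvOk (pvMat m r c) then pvI2 m r c + pvD m R (r+1) c else 0)
  else 0
termination_by R - r

def pvRt (m : List (List Int)) (C : Nat) (r c : Nat) : Int :=
  if _h : c < C then
    (if pvOk (pvMat m r c) then pvI2 m r c + pvRt m C r (c+1) else 0)
  else 0
termination_by C - c

def pvF1 (m : List (List Int)) (r c : Nat) : PVCell :=
  (pvU m r c, pvL m r c, pvI2 m r c, pvI2 m r c)

def pvF2 (m : List (List Int)) (R C r c : Nat) : PVCell :=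
  (pvU m r c, pvL m r c, pvD m R r c, pvRt m C r c)

def pvF0 (m : List (List Int)) (r c : Nat) : PVCell :=
  (pvI2 m r c, pvI2 m r c, pvI2 m r c, pvI2 m r c)

def pvShape (t : List (List PVCell)) (R C : Nat) : Prop :=
  t.length = R ∧ ∀ i, i < R → (t.getD i []).length = C

theorem pvShape_set {t : List (List PVCell)} {R C : Nat} (h : pvShape t R C)
    (r c : Nat) (v : PVCell) : pvShape (pvSetCell t r c v) R C := by
  obtain ⟨h1, h2⟩ := h
  refine ⟨by simp [pvSetCell, h1], fun i hi => ?_⟩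
  by_cases hir : i = r
  · subst hir
    by_cases hlt : i < t.length
    · simp [pvSetCell, List.getD_eq_getElem?_getD, List.getElem?_set_self hlt]
      simpa [List.getD_eq_getElem?_getD, List.getElem?_eq_getElem hlt] using h2 i hi
    · omega
  · simp [pvSetCell, List.getD_eq_getElem?_getD, List.getElem?_set_ne (by omega : r ≠ i)]
    simpa [List.getD_eq_getElem?_getD] using h2 i hi
theorem pvGet_set_same {t : List (List PVCell)} {R C : Nat} (h : pvShape t R C)
    {r c : Nat} (hr : r < R) (hc : c < C) (v : PVCell) :
    pvGetCell (pvSetCell t r c v) r c = v := by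
  obtain ⟨h1, h2⟩ := h
  have hlt : r < t.length := by omega
  have hc' : c < (t.getD r []).length := by rw [h2 r hr]; exact hc
  have hc'' : c < (t[r]?.getD ([]:List PVCell)).length := by
    simpa [List.getD_eq_getElem?_getD] using hc'
  simp [pvGetCell, pvSetCell, List.getD_eq_getElem?_getD, List.getElem?_set_self hlt,
    List.getElem?_set_self hc'']
theorem pvGet_set_ne {t : List (List PVCell)} {r c r' c' : Nat}
    (hne : ¬(r' = r ∧ c' = c)) (v : PVCell) :
    pvGetCell (pvSetCell t r c v) r' c' = pvGetCell t r' c' := by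
  by_cases hrr : r' = r
  · subst hrr
    have hcc : c ≠ c' := by omega
    by_cases hlt : r' < t.length
    · simp [pvGetCell, pvSetCell, List.getD_eq_getElem?_getD, List.getElem?_set_self hlt,
        List.getElem?_set_ne hcc, List.getElem?_eq_getElem hlt]
    · unfold pvGetCell pvSetCell
      rw [List.set_eq_of_length_le (show t.length ≤ r' by omega)]
  · simp [pvGetCell, pvSetCell, List.getD_eq_getElem?_getD,
      List.getElem?_set_ne (fun h => hrr h.symm)]
theorem pvMod_shape {t : List (List PVCell)} {R C : Nat} (h : pvShape t R C)
    (r c : Nat) (f : PVCell → PVCell) : pvShape (pvModCell t r c f) R C :=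
  pvShape_set h r c _

theorem pvGet_mod_same {t : List (List PVCell)} {R C : Nat} (h : pvShape t R C)
    {r c : Nat} (hr : r < R) (hc : c < C) (f : PVCell → PVCell) :
    pvGetCell (pvModCell t r c f) r c = f (pvGetCell t r c) :=
  pvGet_set_same h hr hc _

theorem pvGet_mod_ne {t : List (List PVCell)} {r c r' c' : Nat}
    (hne : ¬(r' = r ∧ c' = c)) (f : PVCell → PVCell) :
    pvGetCell (pvModCell t r c f) r' c' = pvGetCell t r' c' :=
  pvGet_set_ne hne _

theorem pvShape_init (m : List (List Int)) (R C : Nat) :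
    pvShape (pvInit m R C) R C := by
  refine ⟨by simp [pvInit], fun i hi => ?_⟩
  simp [pvInit, List.getD_eq_getElem?_getD, List.getElem?_map, List.getElem?_range, hi]

theorem pvGet_init (m : List (List Int)) {R C r c : Nat} (hr : r < R) (hc : c < C) :
    pvGetCell (pvInit m R C) r c = pvF0 m r c := by
  simp only [pvGetCell, pvInit, List.getD_eq_getElem?_getD, List.getElem?_map,
    List.getElem?_range, hr, hc, if_pos, Option.getD_some]
  by_cases h : pvMat m r c == 2 <;>
    simp [pvF0, pvI2, h, List.getElem?_range, hc] <;> simp at h <;> simp [h]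

-- blocked cells: all spec values vanish
theorem pvI2_blocked {m : List (List Int)} {r c : Nat} (h : ¬ pvOk (pvMat m r c) = true) :
    pvI2 m r c = 0 := by
  simp only [pvOk, Bool.or_eq_true, beq_iff_eq, not_or] at h
  simp [pvI2, h.2]
theorem pvU_blocked {m : List (List Int)} {r c : Nat} (h : ¬ pvOk (pvMat m r c) = true) :
    pvU m r c = 0 := by
  cases r <;> simp [pvU, h]
theorem pvL_blocked {m : List (List Int)} {r c : Nat} (h : ¬ pvOk (pvMat m r c) = true) :
    pvL m r c = 0 := by
  cases c <;> simp [pvL, h]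
theorem pvD_blocked {m : List (List Int)} {R r c : Nat} (h : ¬ pvOk (pvMat m r c) = true) :
    pvD m R r c = 0 := by
  rw [pvD]; simp [h]
theorem pvRt_blocked {m : List (List Int)} {C r c : Nat} (h : ¬ pvOk (pvMat m r c) = true) :
    pvRt m C r c = 0 := by
  rw [pvRt]; simp [h]

-- ===== pass 1 characterisation =====
-- one pass-1 update finalises components 0,1 of cell (r,j)
theorem pvStep1_char (m : List (List Int)) {R C : Nat} {r j : Nat} (hr : r < R) (hj : j < C)
    {t : List (List PVCell)} (ht : pvShape t R C)
    (hget : ∀ i' c', i' < R → c' < C →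
      pvGetCell t i' c' = if i' < r ∨ (i' = r ∧ c' < j) then pvF1 m i' c' else pvF0 m i' c') :
    pvShape (pvStep1 m t r j) R C ∧
    (∀ i' c', i' < R → c' < C →
      pvGetCell (pvStep1 m t r j) i' c' =
        if i' < r ∨ (i' = r ∧ c' < j + 1) then pvF1 m i' c' else pvF0 m i' c') := by
  have hF0rj : pvGetCell t r j = pvF0 m r j := by
    rw [hget r j hr hj, if_neg (by omega)]
  by_cases hok : pvOk (pvMat m r j) = true
  case neg =>
    have hstep : pvStep1 m t r j = t := by simp [pvStep1, hok]
    have hF1F0 : pvF1 m r j = pvF0 m r j := by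
      simp [pvF1, pvF0, pvU_blocked hok, pvL_blocked hok, pvI2_blocked hok]
    rw [hstep]
    refine ⟨ht, fun i' c' hi hc => ?_⟩
    rw [hget i' c' hi hc]
    by_cases h1 : i' < r ∨ (i' = r ∧ c' < j)
    · rw [if_pos h1, if_pos (by omega)]
    · by_cases h2 : i' = r ∧ c' = j
      · rw [if_neg h1, if_pos (by omega), h2.1, h2.2, hF1F0]
      · rw [if_neg h1, if_neg (by omega)]
  case pos =>
    simp only [pvStep1, if_pos hok]
    set t1 := (if 1 ≤ r then
        pvModCell t r j (fun v => (v.1 + (pvGetCell t (r-1) j).1, v.2.1, v.2.2.1, v.2.2.2))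
      else t) with ht1
    have ht1s : pvShape t1 R C := by
      rw [ht1]; split
      · exact pvMod_shape ht r j _
      · exact ht
    have ht1o : ∀ i' c', ¬(i' = r ∧ c' = j) → pvGetCell t1 i' c' = pvGetCell t i' c' := by
      intro i' c' hne; rw [ht1]; split
      · exact pvGet_mod_ne hne _
      · rfl
    have ht1rj : pvGetCell t1 r j = (pvU m r j, pvI2 m r j, pvI2 m r j, pvI2 m r j) := by
      rw [ht1]; split
      case isTrue h1r =>
        rw [pvGet_mod_same ht hr hj, hF0rj]
        obtain ⟨n, rfl⟩ : ∃ n, r = n + 1 := ⟨r - 1, by omega⟩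
        have : pvGetCell t (n + 1 - 1) j = pvF1 m n j := by
          rw [hget (n + 1 - 1) j (by omega) hj]
          simp
        rw [this]
        simp [pvF0, pvF1, pvU, hok]
      case isFalse h1r =>
        have hr0 : r = 0 := by omega
        subst hr0
        rw [hF0rj]
        simp [pvF0, pvU, hok]
    clear ht1 hF0rj
    split
    case isTrue h1c =>
      refine ⟨pvMod_shape ht1s r j _, fun i' c' hi hc => ?_⟩
      by_cases hij : i' = r ∧ c' = j
      · obtain ⟨rfl, rfl⟩ := hij
        rw [pvGet_mod_same ht1s hr hj, ht1rj, ht1o i' (c' - 1) (by omega)]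
        obtain ⟨n, rfl⟩ : ∃ n, c' = n + 1 := ⟨c' - 1, by omega⟩
        have : pvGetCell t (i') (n + 1 - 1) = pvF1 m i' n := by
          rw [hget i' (n + 1 - 1) hi (by omega)]
          simp
        rw [this, if_pos (by omega)]
        simp [pvF1, pvL, hok]
      · rw [pvGet_mod_ne hij _, ht1o i' c' hij, hget i' c' hi hc]
        by_cases h1 : i' < r ∨ (i' = r ∧ c' < j)
        · rw [if_pos h1, if_pos (by omega)]
        · rw [if_neg h1, if_neg (by omega)]
    case isFalse h1c =>
      have hj0 : j = 0 := by omega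
      refine ⟨ht1s, fun i' c' hi hc => ?_⟩
      by_cases hij : i' = r ∧ c' = j
      · obtain ⟨rfl, rfl⟩ := hij
        rw [ht1rj, if_pos (by omega)]
        subst hj0
        simp [pvF1, pvL, hok]
      · rw [ht1o i' c' hij, hget i' c' hi hc]
        by_cases h1 : i' < r ∨ (i' = r ∧ c' < j)
        · rw [if_pos h1, if_pos (by omega)]
        · rw [if_neg h1, if_neg (by omega)]

theorem pvInner1 (m : List (List Int)) (R C : Nat) (r : Nat) (hr : r < R) :
    ∀ (j : Nat), j ≤ C → ∀ t, pvShape t R C →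
    (∀ i' c', i' < R → c' < C →
      pvGetCell t i' c' = if i' < r then pvF1 m i' c' else pvF0 m i' c') →
    pvShape ((List.range j).foldl (fun t c => pvStep1 m t r c) t) R C ∧
    (∀ i' c', i' < R → c' < C →
      pvGetCell ((List.range j).foldl (fun t c => pvStep1 m t r c) t) i' c' =
        if i' < r ∨ (i' = r ∧ c' < j) then pvF1 m i' c' else pvF0 m i' c') := by
  intro j
  induction j with
  | zero =>
    intro _ t ht hget
    refine ⟨by simpa using ht, fun i' c' hi hc => ?_⟩
    simp only [List.range_zero, List.foldl_nil]
    rw [hget i' c' hi hc]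
    by_cases h : i' < r
    · rw [if_pos h, if_pos (Or.inl h)]
    · rw [if_neg h, if_neg (by omega)]
  | succ j ih =>
    intro hj t ht hget
    obtain ⟨ht2, hget2⟩ := ih (by omega) t ht hget
    rw [List.range_succ, List.foldl_append, List.foldl_cons, List.foldl_nil]
    exact pvStep1_char m hr (by omega) ht2 hget2

theorem pvPass1_char (m : List (List Int)) (R C : Nat) :
    pvShape (pvPass1 m R C (pvInit m R C)) R C ∧
    (∀ r c, r < R → c < C →
      pvGetCell (pvPass1 m R C (pvInit m R C)) r c = pvF1 m r c) := by
  suffices H : ∀ k, k ≤ R →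
      pvShape ((List.range k).foldl
        (fun t r => (List.range C).foldl (fun t c => pvStep1 m t r c) t) (pvInit m R C)) R C ∧
      (∀ r c, r < R → c < C →
        pvGetCell ((List.range k).foldl
          (fun t r => (List.range C).foldl (fun t c => pvStep1 m t r c) t) (pvInit m R C)) r c =
          if r < k then pvF1 m r c else pvF0 m r c) by
    obtain ⟨h1, h2⟩ := H R le_rfl
    exact ⟨h1, fun r c hr hc => by rw [pvPass1, h2 r c hr hc, if_pos hr]⟩
  intro k
  induction k with
  | zero =>
    intro _
    refine ⟨pvShape_init m R C, fun r c hr hc => ?_⟩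
    simp only [List.range_zero, List.foldl_nil]
    rw [pvGet_init m hr hc, if_neg (by omega)]
  | succ k ih =>
    intro hk
    obtain ⟨ht, hget⟩ := ih (by omega)
    rw [List.range_succ, List.foldl_append, List.foldl_cons, List.foldl_nil]
    obtain ⟨h1, h2⟩ := pvInner1 m R C k (by omega) C le_rfl _ ht hget
    refine ⟨h1, fun r c hr hc => ?_⟩
    rw [h2 r c hr hc]
    by_cases h : r < k ∨ (r = k ∧ c < C)
    · rw [if_pos h, if_pos (by omega)]
    · rw [if_neg h, if_neg (by omega)]

-- ===== pass 2 characterisation =====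
-- one pass-2 update finalises components 2,3 of cell (r,j)
theorem pvStep2_char (m : List (List Int)) {R C : Nat} {r j : Nat} (hr : r < R) (hj : j < C)
    {t : List (List PVCell)} (ht : pvShape t R C)
    (hget : ∀ i' c', i' < R → c' < C →
      pvGetCell t i' c' =
        if r < i' ∨ (i' = r ∧ j + 1 ≤ c') then pvF2 m R C i' c' else pvF1 m i' c') :
    pvShape (pvStep2 m R C t r j) R C ∧
    (∀ i' c', i' < R → c' < C →
      pvGetCell (pvStep2 m R C t r j) i' c' =
        if r < i' ∨ (i' = r ∧ j ≤ c') then pvF2 m R C i' c' else pvF1 m i' c') := by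
  have hF1rj : pvGetCell t r j = pvF1 m r j := by
    rw [hget r j hr hj, if_neg (by omega)]
  by_cases hok : pvOk (pvMat m r j) = true
  case neg =>
    have hstep : pvStep2 m R C t r j = t := by simp [pvStep2, hok]
    have hF2F1 : pvF2 m R C r j = pvF1 m r j := by
      simp [pvF1, pvF2, pvD_blocked hok, pvRt_blocked hok, pvI2_blocked hok]
    rw [hstep]
    refine ⟨ht, fun i' c' hi hc => ?_⟩
    rw [hget i' c' hi hc]
    by_cases h1 : r < i' ∨ (i' = r ∧ j + 1 ≤ c')
    · rw [if_pos h1, if_pos (by omega)]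
    · by_cases h2 : i' = r ∧ c' = j
      · rw [if_neg h1, if_pos (by omega), h2.1, h2.2, hF2F1]
      · rw [if_neg h1, if_neg (by omega)]
  case pos =>
    simp only [pvStep2, if_pos hok]
    set t1 := (if r + 1 < R then
        pvModCell t r j (fun v => (v.1, v.2.1, v.2.2.1 + (pvGetCell t (r+1) j).2.2.1, v.2.2.2))
      else t) with ht1
    have ht1s : pvShape t1 R C := by
      rw [ht1]; split
      · exact pvMod_shape ht r j _
      · exact ht
    have ht1o : ∀ i' c', ¬(i' = r ∧ c' = j) → pvGetCell t1 i' c' = pvGetCell t i' c' := by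
      intro i' c' hne; rw [ht1]; split
      · exact pvGet_mod_ne hne _
      · rfl
    have ht1rj : pvGetCell t1 r j = (pvU m r j, pvL m r j, pvD m R r j, pvI2 m r j) := by
      rw [ht1]; split
      case isTrue h1r =>
        rw [pvGet_mod_same ht hr hj, hF1rj]
        have : pvGetCell t (r + 1) j = pvF2 m R C (r + 1) j := by
          rw [hget (r + 1) j (by omega) hj, if_pos (by omega)]
        rw [this]
        have hD : pvD m R r j = pvI2 m r j + pvD m R (r + 1) j := by
          conv_lhs => rw [pvD]
          simp [hr, hok]
        simp [pvF1, pvF2, hD]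
      case isFalse h1r =>
        rw [hF1rj]
        have hD : pvD m R r j = pvI2 m r j := by
          conv_lhs => rw [pvD]
          rw [pvD]
          simp [hr, hok, show ¬ r + 1 < R by omega]
        simp [pvF1, hD]
    clear ht1 hF1rj
    split
    case isTrue h1c =>
      refine ⟨pvMod_shape ht1s r j _, fun i' c' hi hc => ?_⟩
      by_cases hij : i' = r ∧ c' = j
      · obtain ⟨rfl, rfl⟩ := hij
        rw [pvGet_mod_same ht1s hr hj, ht1rj, ht1o i' (c' + 1) (by omega)]
        have : pvGetCell t i' (c' + 1) = pvF2 m R C i' (c' + 1) := by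
          rw [hget i' (c' + 1) hi (by omega), if_pos (by omega)]
        rw [this, if_pos (by omega)]
        have hRt : pvRt m C i' c' = pvI2 m i' c' + pvRt m C i' (c' + 1) := by
          conv_lhs => rw [pvRt]
          simp [hj, hok]
        simp [pvF2, hRt]
      · rw [pvGet_mod_ne hij _, ht1o i' c' hij, hget i' c' hi hc]
        by_cases h1 : r < i' ∨ (i' = r ∧ j + 1 ≤ c')
        · rw [if_pos h1, if_pos (by omega)]
        · rw [if_neg h1, if_neg (by omega)]
    case isFalse h1c =>
      refine ⟨ht1s, fun i' c' hi hc => ?_⟩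
      by_cases hij : i' = r ∧ c' = j
      · obtain ⟨rfl, rfl⟩ := hij
        rw [ht1rj, if_pos (by omega)]
        have hRt : pvRt m C i' c' = pvI2 m i' c' := by
          conv_lhs => rw [pvRt]
          rw [pvRt]
          simp [hj, hok, show ¬ c' + 1 < C by omega]
        simp [pvF2, hRt]
      · rw [ht1o i' c' hij, hget i' c' hi hc]
        by_cases h1 : r < i' ∨ (i' = r ∧ j + 1 ≤ c')
        · rw [if_pos h1, if_pos (by omega)]
        · rw [if_neg h1, if_neg (by omega)]

theorem pvInner2 (m : List (List Int)) (R C : Nat) (r : Nat) (hr : r < R) :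
    ∀ (j : Nat), j ≤ C → ∀ t, pvShape t R C →
    (∀ i' c', i' < R → c' < C →
      pvGetCell t i' c' =
        if r < i' ∨ (i' = r ∧ j ≤ c') then pvF2 m R C i' c' else pvF1 m i' c') →
    pvShape ((List.range j).reverse.foldl (fun t c => pvStep2 m R C t r c) t) R C ∧
    (∀ i' c', i' < R → c' < C →
      pvGetCell ((List.range j).reverse.foldl (fun t c => pvStep2 m R C t r c) t) i' c' =
        if r ≤ i' then pvF2 m R C i' c' else pvF1 m i' c') := by
  intro j
  induction j with
  | zero =>
    intro _ t ht hget
    refine ⟨by simpa using ht, fun i' c' hi hc => ?_⟩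
    simp only [List.range_zero, List.reverse_nil, List.foldl_nil]
    rw [hget i' c' hi hc]
    by_cases h : r ≤ i'
    · rw [if_pos (by omega), if_pos h]
    · rw [if_neg (by omega), if_neg h]
  | succ j ih =>
    intro hj t ht hget
    have hrw : (List.range (j+1)).reverse = j :: (List.range j).reverse := by
      rw [List.range_succ, List.reverse_append]; rfl
    rw [hrw, List.foldl_cons]
    obtain ⟨h1, h2⟩ := pvStep2_char m hr (by omega) ht hget
    exact ih (by omega) _ h1 h2

theorem pvPass2_char (m : List (List Int)) (R C : Nat) (t : List (List PVCell))
    (ht : pvShape t R C)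
    (hget : ∀ r c, r < R → c < C → pvGetCell t r c = pvF1 m r c) :
    ∀ r c, r < R → c < C → pvGetCell (pvPass2 m R C t) r c = pvF2 m R C r c := by
  suffices H : ∀ k, k ≤ R → ∀ t, pvShape t R C →
      (∀ i' c', i' < R → c' < C →
        pvGetCell t i' c' = if k ≤ i' then pvF2 m R C i' c' else pvF1 m i' c') →
      (∀ i' c', i' < R → c' < C →
        pvGetCell ((List.range k).reverse.foldl
          (fun t r => (List.range C).reverse.foldl (fun t c => pvStep2 m R C t r c) t) t) i' c' =
          pvF2 m R C i' c') by
    intro r c hr hc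
    refine H R le_rfl t ht (fun i' c' hi hc' => ?_) r c hr hc
    rw [hget i' c' hi hc', if_neg (by omega)]
  intro k
  induction k with
  | zero =>
    intro _ t ht hget i' c' hi hc
    simp only [List.range_zero, List.reverse_nil, List.foldl_nil]
    rw [hget i' c' hi hc, if_pos (by omega)]
  | succ k ih =>
    intro hk t ht hget
    have hrw : (List.range (k+1)).reverse = k :: (List.range k).reverse := by
      rw [List.range_succ, List.reverse_append]; rfl
    rw [hrw, List.foldl_cons]
    have hget' : ∀ i' c', i' < R → c' < C →
        pvGetCell t i' c' =
          if k < i' ∨ (i' = k ∧ C ≤ c') then pvF2 m R C i' c' else pvF1 m i' c' := by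
      intro i' c' hi hc
      rw [hget i' c' hi hc]
      by_cases h : k + 1 ≤ i'
      · rw [if_pos h, if_pos (by omega)]
      · rw [if_neg h, if_neg (by omega)]
    obtain ⟨h1, h2⟩ := pvInner2 m R C k (by omega) C le_rfl t ht hget'
    exact ih (by omega) _ h1 h2

-- ===== walk characterisation =====
theorem pvWalk_stop (m : List (List Int)) (R C : Nat) (dr dc : Int) (fuel : Nat)
    (r c : Int)
    (h : ¬(0 ≤ r ∧ r < (R:Int) ∧ 0 ≤ c ∧ c < (C:Int) ∧ pvOk (pvMat m r.toNat c.toNat) = true)) :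
    pvWalk m R C dr dc fuel r c = 0 := by
  cases fuel <;> simp [pvWalk, h]

theorem pvWalk_up (m : List (List Int)) (R C : Nat) :
    ∀ (fuel : Nat) (r c : Nat), r < fuel → r < R → c < C →
    pvWalk m R C (-1) 0 fuel (r:Int) (c:Int) = pvU m r c := by
  intro fuel
  induction fuel with
  | zero => intro r c h _ _; omega
  | succ f ih =>
    intro r c _ hr hc
    by_cases hok : pvOk (pvMat m r c) = true
    · cases r with
      | zero =>
        have hstop : pvWalk m R C (-1) 0 f (-1) ((c:Nat):Int) = 0 :=
          pvWalk_stop m R C (-1) 0 f _ _ (by rintro ⟨h1, -⟩; omega)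
        simp [pvWalk, hr, hc, hok, pvU, pvI2, hstop]
      | succ n =>
        have hcast : ((n+1:Nat):Int) + (-1) = ((n:Nat):Int) := by push_cast; ring
        have hih := ih n c (by omega) (by omega) hc
        simp only [pvWalk]
        rw [if_pos (by refine ⟨by positivity, by exact_mod_cast hr, by positivity,
          by exact_mod_cast hc, by simpa using hok⟩)]
        have e2 : ((c:Nat):Int) + 0 = ((c:Nat):Int) := by ring
        rw [hcast, e2, hih]
        simp [pvU, pvI2, hok, Int.toNat_natCast]
    · have : pvWalk m R C (-1) 0 (f+1) (r:Int) (c:Int) = 0 :=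
        pvWalk_stop m R C (-1) 0 _ _ _ (by simp [hok])
      rw [this, pvU_blocked hok]

theorem pvWalk_left (m : List (List Int)) (R C : Nat) :
    ∀ (fuel : Nat) (r c : Nat), c < fuel → r < R → c < C →
    pvWalk m R C 0 (-1) fuel (r:Int) (c:Int) = pvL m r c := by
  intro fuel
  induction fuel with
  | zero => intro r c h _ _; omega
  | succ f ih =>
    intro r c _ hr hc
    by_cases hok : pvOk (pvMat m r c) = true
    · cases c with
      | zero =>
        have hstop : pvWalk m R C 0 (-1) f ((r:Nat):Int) (-1) = 0 :=
          pvWalk_stop m R C 0 (-1) f _ _ (by rintro ⟨-, -, h3, -⟩; omega)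
        simp [pvWalk, hr, hc, hok, pvL, pvI2, hstop]
      | succ n =>
        have hcast : ((n+1:Nat):Int) + (-1) = ((n:Nat):Int) := by push_cast; ring
        have hih := ih r n (by omega) hr (by omega)
        simp only [pvWalk]
        rw [if_pos (by refine ⟨by positivity, by exact_mod_cast hr, by positivity,
          by exact_mod_cast hc, by simpa using hok⟩)]
        have e2 : ((r:Nat):Int) + 0 = ((r:Nat):Int) := by ring
        rw [hcast, e2, hih]
        simp [pvL, pvI2, hok, Int.toNat_natCast]
    · have : pvWalk m R C 0 (-1) (f+1) (r:Int) (c:Int) = 0 :=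
        pvWalk_stop m R C 0 (-1) _ _ _ (by simp [hok])
      rw [this, pvL_blocked hok]

theorem pvWalk_down (m : List (List Int)) (R C : Nat) :
    ∀ (fuel : Nat) (r c : Nat), R ≤ fuel + r → c < C →
    pvWalk m R C 1 0 fuel (r:Int) (c:Int) = pvD m R r c := by
  intro fuel
  induction fuel with
  | zero =>
    intro r c h _
    have hge : R ≤ r := by omega
    rw [pvWalk, pvD]; simp [show ¬ r < R by omega]
  | succ f ih =>
    intro r c hfuel hc
    by_cases hr : r < R
    · by_cases hok : pvOk (pvMat m r c) = true
      · have hcast : ((r:Nat):Int) + 1 = ((r+1:Nat):Int) := by push_cast; ring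
        have hih := ih (r+1) c (by omega) hc
        simp only [pvWalk]
        rw [if_pos (by refine ⟨by positivity, by exact_mod_cast hr, by positivity,
          by exact_mod_cast hc, by simpa using hok⟩)]
        have e2 : ((c:Nat):Int) + 0 = ((c:Nat):Int) := by ring
        rw [hcast, e2, hih]
        conv_rhs => rw [pvD]
        simp [hr, hok, pvI2, Int.toNat_natCast]
      · have : pvWalk m R C 1 0 (f+1) (r:Int) (c:Int) = 0 :=
          pvWalk_stop m R C 1 0 _ _ _ (by simp [hok])
        rw [this, pvD_blocked hok]
    · have hstop : pvWalk m R C 1 0 (f+1) ((r:Nat):Int) ((c:Nat):Int) = 0 :=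
        pvWalk_stop m R C 1 0 _ _ _ (by rintro ⟨-, h2, -⟩; exact hr (by exact_mod_cast h2))
      rw [hstop, pvD]; simp [hr]

theorem pvWalk_right (m : List (List Int)) (R C : Nat) :
    ∀ (fuel : Nat) (r c : Nat), C ≤ fuel + c → r < R →
    pvWalk m R C 0 1 fuel (r:Int) (c:Int) = pvRt m C r c := by
  intro fuel
  induction fuel with
  | zero =>
    intro r c h _
    rw [pvWalk, pvRt]; simp [show ¬ c < C by omega]
  | succ f ih =>
    intro r c hfuel hr
    by_cases hc : c < C
    · by_cases hok : pvOk (pvMat m r c) = true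
      · have hcast : ((c:Nat):Int) + 1 = ((c+1:Nat):Int) := by push_cast; ring
        have hih := ih r (c+1) (by omega) hr
        simp only [pvWalk]
        rw [if_pos (by refine ⟨by positivity, by exact_mod_cast hr, by positivity,
          by exact_mod_cast hc, by simpa using hok⟩)]
        have e2 : ((r:Nat):Int) + 0 = ((r:Nat):Int) := by ring
        rw [hcast, e2, hih]
        conv_rhs => rw [pvRt]
        simp [hc, hok, pvI2, Int.toNat_natCast]
      · have : pvWalk m R C 0 1 (f+1) (r:Int) (c:Int) = 0 :=
          pvWalk_stop m R C 0 1 _ _ _ (by simp [hok])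
        rw [this, pvRt_blocked hok]
    · have hstop : pvWalk m R C 0 1 (f+1) ((r:Nat):Int) ((c:Nat):Int) = 0 :=
        pvWalk_stop m R C 0 1 _ _ _ (by rintro ⟨-, -, -, h4, -⟩; exact hc (by exact_mod_cast h4))
      rw [hstop, pvRt]; simp [hc]

-- per empty cell, B's four counts sum to A's cell sum
theorem pvCell_eq (m : List (List Int)) (R C : Nat) (r c : Nat)
    (hr : r < R) (hc : c < C) (h0 : pvMat m r c = 0) :
    pvCount m R C r c (-1) 0 + pvCount m R C r c 1 0
      + pvCount m R C r c 0 (-1) + pvCount m R C r c 0 1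
      = pvSum4 (pvF2 m R C r c) := by
  have hok : pvOk (pvMat m r c) = true := by simp [pvOk, h0]
  have hi2 : pvI2 m r c = 0 := by simp [pvI2, h0]
  have hu : pvCount m R C r c (-1) 0 = pvU m r c := by
    unfold pvCount
    rw [show ((c:Nat):Int) + 0 = ((c:Nat):Int) by ring]
    cases r with
    | zero =>
      rw [pvWalk_stop m R C (-1) 0 _ _ _ (by rintro ⟨h1, -⟩; omega)]
      simp [pvU, hok, hi2]
    | succ n =>
      rw [show ((n+1:Nat):Int) + (-1) = ((n:Nat):Int) by push_cast; ring,
        pvWalk_up m R C (R+C) n c (by omega) (by omega) hc]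
      conv_rhs => rw [pvU]
      rw [if_pos hok, hi2]
      ring
  have hl : pvCount m R C r c 0 (-1) = pvL m r c := by
    unfold pvCount
    rw [show ((r:Nat):Int) + 0 = ((r:Nat):Int) by ring]
    cases c with
    | zero =>
      rw [pvWalk_stop m R C 0 (-1) _ _ _ (by rintro ⟨-, -, h3, -⟩; omega)]
      simp [pvL, hok, hi2]
    | succ n =>
      rw [show ((n+1:Nat):Int) + (-1) = ((n:Nat):Int) by push_cast; ring,
        pvWalk_left m R C (R+C) r n (by omega) hr (by omega)]
      conv_rhs => rw [pvL]
      rw [if_pos hok, hi2]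
      ring
  have hd : pvCount m R C r c 1 0 = pvD m R r c := by
    unfold pvCount
    rw [show ((c:Nat):Int) + 0 = ((c:Nat):Int) by ring,
      show ((r:Nat):Int) + 1 = ((r+1:Nat):Int) by push_cast; ring,
      pvWalk_down m R C (R+C) (r+1) c (by omega) hc]
    conv_rhs => rw [pvD]
    rw [dif_pos hr, if_pos hok, hi2]
    ring
  have hrt : pvCount m R C r c 0 1 = pvRt m C r c := by
    unfold pvCount
    rw [show ((r:Nat):Int) + 0 = ((r:Nat):Int) by ring,
      show ((c:Nat):Int) + 1 = ((c+1:Nat):Int) by push_cast; ring,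
      pvWalk_right m R C (R+C) r (c+1) (by omega) hr]
    conv_rhs => rw [pvRt]
    rw [dif_pos hc, if_pos hok, hi2]
    ring
  rw [hu, hl, hd, hrt]
  simp [pvSum4, pvF2]
  ring

-- ===== aggregation =====
theorem pvFoldl_max_if {α : Type} (l : List α) (p : α → Bool) (s : α → Int) (a : Int) :
    l.foldl (fun b x => if p x then max b (s x) else b) a
      = (l.filterMap (fun x => if p x then some (s x) else none)).foldl max a := by
  induction l generalizing a with
  | nil => simp
  | cons x t ih => by_cases hx : p x <;> simp [hx, ih]

theorem pvFoldl_max_flat {α : Type} (l : List α) (g : α → List Int) (a : Int) :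
    l.foldl (fun b x => (g x).foldl max b) a = (l.flatMap g).foldl max a := by
  induction l generalizing a with
  | nil => simp
  | cons x t ih => simp [List.flatMap_cons, List.foldl_append, ih]

theorem pvFoldl_max_eq_max? (l : List Int) (h : ∀ x ∈ l, 0 ≤ x) :
    l.foldl max 0 = (PySem.List.max? l (fun x => x)).getD 0 := by
  cases l with
  | nil =>
    have : PySem.List.max? ([]:List Int) (fun x => x) = none :=
      (PySem.List.max?_eq_none_iff _ _).mpr rfl
    simp [this]
  | cons x t =>
    rw [PySem.List.max?_id_cons]
    have hx : max 0 x = x := max_eq_right (h x (by simp))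
    simp [List.foldl, hx]

theorem pvU_nonneg (m : List (List Int)) (r c : Nat) : 0 ≤ pvU m r c := by
  induction r with
  | zero => simp only [pvU]; split <;> simp [pvI2] <;> split <;> omega
  | succ n ih =>
    simp only [pvU]; split
    · have : (0:Int) ≤ pvI2 m (n+1) c := by simp [pvI2]; split <;> omega
      omega
    · omega
theorem pvL_nonneg (m : List (List Int)) (r c : Nat) : 0 ≤ pvL m r c := by
  induction c with
  | zero => simp only [pvL]; split <;> simp [pvI2] <;> split <;> omega
  | succ n ih =>
    simp only [pvL]; split
    · have : (0:Int) ≤ pvI2 m r (n+1) := by simp [pvI2]; split <;> omega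
      omega
    · omega
theorem pvD_nonneg (m : List (List Int)) (R r c : Nat) : 0 ≤ pvD m R r c := by
  suffices H : ∀ n r c, R - r ≤ n → 0 ≤ pvD m R r c from H R r c (by omega)
  intro n
  induction n with
  | zero =>
    intro r c h; rw [pvD]
    simp [show ¬ r < R by omega]
  | succ n ih =>
    intro r c h; rw [pvD]
    split
    · split
      · have : (0:Int) ≤ pvI2 m r c := by simp [pvI2]; split <;> omega
        have := ih (r+1) c (by omega)
        omega
      · omega
    · omega
theorem pvRt_nonneg (m : List (List Int)) (C r c : Nat) : 0 ≤ pvRt m C r c := by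
  suffices H : ∀ n r c, C - c ≤ n → 0 ≤ pvRt m C r c from H C r c (by omega)
  intro n
  induction n with
  | zero =>
    intro r c h; rw [pvRt]
    simp [show ¬ c < C by omega]
  | succ n ih =>
    intro r c h; rw [pvRt]
    split
    · split
      · have : (0:Int) ≤ pvI2 m r c := by simp [pvI2]; split <;> omega
        have := ih r (c+1) (by omega)
        omega
      · omega
    · omega

theorem pvFlatMap_congr {α β : Type} {l : List α} {f g : α → List β}
    (h : ∀ a ∈ l, f a = g a) : l.flatMap f = l.flatMap g := by
  induction l with
  | nil => rfl
  | cons x t ih =>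
    simp only [List.flatMap_cons, h x (by simp), ih (fun a ha => h a (by simp [ha]))]

theorem pvFilterMap_congr {α β : Type} {l : List α} {f g : α → Option β}
    (h : ∀ a ∈ l, f a = g a) : l.filterMap f = l.filterMap g := by
  induction l with
  | nil => rfl
  | cons x t ih =>
    simp only [List.filterMap_cons, h x (by simp), ih (fun a ha => h a (by simp [ha]))]

theorem pvMain (m : List (List Int)) (R C : Nat) :
    (PySem.List.max? ((List.range R).flatMap (fun r => (List.range C).filterMap (fun c =>
        if pvMat m r c == 0 then
          some (pvSum4 (pvGetCell (pvPass2 m R C (pvPass1 m R C (pvInit m R C))) r c))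
        else none))) (fun x => x)).getD 0
      = (List.range R).foldl (fun best r => (List.range C).foldl (fun best c =>
          if pvMat m r c == 0 then
            max best (pvCount m R C r c (-1) 0 + pvCount m R C r c 1 0
              + pvCount m R C r c 0 (-1) + pvCount m R C r c 0 1)
          else best) best) 0 := by
  obtain ⟨hs1, hg1⟩ := pvPass1_char m R C
  have hg2 := pvPass2_char m R C _ hs1 hg1
  have hnn : ∀ x ∈ (List.range R).flatMap (fun r => (List.range C).filterMap (fun c =>
      if pvMat m r c == 0 then
        some (pvSum4 (pvGetCell (pvPass2 m R C (pvPass1 m R C (pvInit m R C))) r c))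
      else none)), 0 ≤ x := by
    intro x hx
    simp only [List.mem_flatMap, List.mem_filterMap, List.mem_range] at hx
    obtain ⟨r, hr, c, hc, hif⟩ := hx
    by_cases h0 : pvMat m r c == 0
    · rw [if_pos h0] at hif
      obtain rfl := Option.some.inj hif
      rw [hg2 r c hr hc]
      have h1 := pvU_nonneg m r c
      have h2 := pvL_nonneg m r c
      have h3 := pvD_nonneg m R r c
      have h4 := pvRt_nonneg m C r c
      simp only [pvSum4, pvF2]
      omega
    · rw [if_neg h0] at hif
      exact absurd hif (by simp)
  rw [← pvFoldl_max_eq_max? _ hnn]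
  have hcong : ∀ (b : Int) (r : Nat), r ∈ List.range R →
      ((List.range C).foldl (fun best c =>
        if pvMat m r c == 0 then
          max best (pvCount m R C r c (-1) 0 + pvCount m R C r c 1 0
            + pvCount m R C r c 0 (-1) + pvCount m R C r c 0 1)
        else best) b)
        = ((List.range C).filterMap (fun c =>
          if pvMat m r c == 0 then
            some (pvCount m R C r c (-1) 0 + pvCount m R C r c 1 0
              + pvCount m R C r c 0 (-1) + pvCount m R C r c 0 1)
          else none)).foldl max b :=
    fun b r _ => pvFoldl_max_if (List.range C) _ _ b
  have hB1 : (List.range R).foldl (fun best r => (List.range C).foldl (fun best c =>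
        if pvMat m r c == 0 then
          max best (pvCount m R C r c (-1) 0 + pvCount m R C r c 1 0
            + pvCount m R C r c 0 (-1) + pvCount m R C r c 0 1)
        else best) best) 0
      = (List.range R).foldl (fun b r => ((List.range C).filterMap (fun c =>
          if pvMat m r c == 0 then
            some (pvCount m R C r c (-1) 0 + pvCount m R C r c 1 0
              + pvCount m R C r c 0 (-1) + pvCount m R C r c 0 1)
          else none)).foldl max b) 0 :=
    PySem.List.foldl_congr_mem _ _ _ _ hcong
  rw [hB1, pvFoldl_max_flat]
  congr 1
  refine pvFlatMap_congr fun r hr => pvFilterMap_congr fun c hc => ?_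
  simp only [List.mem_range] at hr hc
  by_cases h0 : pvMat m r c == 0
  · rw [if_pos h0, if_pos h0, hg2 r c hr hc]
    exact congrArg some (pvCell_eq m R C r c hr hc (by simpa using h0)).symm
  · rw [if_neg h0, if_neg h0]

-- ===== VERDICT (by name: the statement is the Claim_ definition above) =====
theorem solve_spec : Claim_equal_solve := by
  intro matrix _ _
  show solve matrix = solve_alt matrix
  exact pvMain matrix matrix.length (matrix.getD 0 []).length
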